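-- pv_equiv track=rewrite | github.com/ogchen/nanofold | nanofold/data_processing/a3m_parser.py | compute_deletion_matrix
-- ===== SOURCE A (Python) =====
-- def compute_deletion_matrix(alignments):
--     deletion_matrix = []
--     for seq in alignments:
--         deletion_row = []
--         deletion_count = 0
--         for c in seq:
--             if c.islower():
--                 deletion_count += 1
--             else:
--                 deletion_row.append(deletion_count)
--                 deletion_count = 0
--         deletion_matrix.append(deletion_row)
--     return deletion_matrix
-- ===== SOURCE B (Python) =====
-- def compute_deletion_matrix(alignments):
--     matrix = []
--     for seq in alignments:
--         positions = [i for i, c in enumerate(seq) if not c.islower()]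
--         matrix.append([positions[k] - (positions[k - 1] if k else -1) - 1
--                        for k in range(len(positions))])
--     return matrix
-- ===== Notes on version B (the rewrite author's own statement) =====
-- stated objective: alternative
-- what changed: Replaces the stateful accumulate-and-reset character scan with a locate-boundaries-then-difference computation: collect the indices of non-lowercase characters, then each deletion count is the gap between consecutive boundary indices (virtual previous index -1).
import Mathlib
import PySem

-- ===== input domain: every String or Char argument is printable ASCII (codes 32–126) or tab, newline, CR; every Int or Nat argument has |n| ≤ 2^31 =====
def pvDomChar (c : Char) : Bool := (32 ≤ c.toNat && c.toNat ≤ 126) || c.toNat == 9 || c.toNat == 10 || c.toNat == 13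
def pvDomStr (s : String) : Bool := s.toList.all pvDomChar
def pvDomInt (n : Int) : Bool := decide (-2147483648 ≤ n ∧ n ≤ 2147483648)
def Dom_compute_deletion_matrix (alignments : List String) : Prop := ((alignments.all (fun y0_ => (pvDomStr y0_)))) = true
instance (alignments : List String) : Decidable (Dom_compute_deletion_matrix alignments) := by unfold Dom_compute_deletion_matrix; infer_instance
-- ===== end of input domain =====

-- B replaces A's accumulate-and-reset scan by boundary indices plus consecutive differences (objective: alternative decomposition, same cost).

-- ===== PORT A =====
-- inner loop of A: state (deletion_row, deletion_count)
def pvStepA (st : List Int × Int) (c : Char) : List Int × Int :=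
  if PySem.Chars.islower c then (st.1, st.2 + 1) else (st.1 ++ [st.2], 0)

def compute_deletion_matrix (alignments : List String) : List (List Int) :=
  alignments.foldl (fun m seq => m ++ [(seq.toList.foldl pvStepA ([], 0)).1]) []

-- ===== PORT B =====
-- positions = [i for i, c in enumerate(seq) if not c.islower()]
def pvPositions (cs : List Char) (s : Int) : List Int :=
  ((PySem.List.enumerate cs s).filter (fun p => !PySem.Chars.islower p.2)).map (·.1)

-- row = gaps between consecutive boundary indices, virtual previous index prev (initially -1)
def pvGaps (prev : Int) : List Int → List Int
  | [] => []
  | p :: ps => (p - prev - 1) :: pvGaps p ps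

def compute_deletion_matrix_alt (alignments : List String) : List (List Int) :=
  alignments.map (fun seq => pvGaps (-1) (pvPositions seq.toList 0))

-- ===== PRECONDITION & SPEC =====
def Spec_compute_deletion_matrix (alignments : List String) (out : List (List Int)) : Prop := out = compute_deletion_matrix_alt alignments
instance (alignments : List String) (out : List (List Int)) : Decidable (Spec_compute_deletion_matrix alignments out) := by unfold Spec_compute_deletion_matrix; infer_instance

-- ===== CLAIM (what is proved, stated in full; the proofs are below) =====
def Claim_equal_compute_deletion_matrix : Prop := ∀ (alignments : List String), Dom_compute_deletion_matrix alignments → Spec_compute_deletion_matrix alignments (compute_deletion_matrix alignments)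

-- ===== LEMMAS AND PROOFS =====

-- loop invariant for A's inner scan: with cnt lowercase chars pending since the last
-- boundary, the scan appends exactly the gaps between the remaining boundary indices
theorem pv_inner (cs : List Char) : ∀ (s : Int) (row : List Int) (cnt : Int),
    (cs.foldl pvStepA (row, cnt)).1 = row ++ pvGaps (s - cnt - 1) (pvPositions cs s) := by
  induction cs with
  | nil => intro s row cnt; simp [pvPositions, pvGaps, PySem.List.enumerate_nil]
  | cons c cs ih =>
    intro s row cnt
    by_cases h : PySem.Chars.islower c = true
    · have := ih (s + 1) row (cnt + 1)
      simp only [List.foldl_cons, pvStepA, h, if_pos, pvPositions,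
        PySem.List.enumerate_cons, List.filter_cons, Bool.not_eq_true'] at this ⊢
      simp at this ⊢
      rw [this]
    · have := ih (s + 1) (row ++ [cnt]) 0
      simp only [List.foldl_cons, pvStepA, h, pvPositions,
        PySem.List.enumerate_cons, List.filter_cons] at this ⊢
      simp at this ⊢
      rw [this]
      simp only [pvGaps]
      have e : s - (s - cnt - 1) - 1 = cnt := by ring
      rw [e]

theorem pv_outer (l : List String) : ∀ acc : List (List Int),
    l.foldl (fun m seq => m ++ [(seq.toList.foldl pvStepA ([], 0)).1]) acc
      = acc ++ l.map (fun seq => pvGaps (-1) (pvPositions seq.toList 0)) := by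
  induction l with
  | nil => intro acc; simp
  | cons x l ih =>
    intro acc
    have h := pv_inner x.toList 0 [] 0
    simp only [List.foldl_cons, List.map_cons, ih]
    norm_num at h
    simp [h]

-- ===== VERDICT (by name: the statement is the Claim_ definition above) =====
theorem compute_deletion_matrix_spec : Claim_equal_compute_deletion_matrix := by
  intro alignments _
  show compute_deletion_matrix alignments = compute_deletion_matrix_alt alignments
  simpa [compute_deletion_matrix, compute_deletion_matrix_alt] using pv_outer alignments []
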